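-- pv_equiv track=rewrite | github.com/YuanzhangLin/GUI-Anything | backend/app/engine/uimapgenerate/src/analyzer/project_analyzer.py | _pick_primary_layout
-- ===== SOURCE A (Python) =====
-- def _pick_primary_layout(class_name, layout_set):
--     """
--     从布局集合中选出一个最像主布局的显示在 JSON 顶层。
--     优先逻辑: activity_ > fragment_ > 其他
--     """
--     if not layout_set: return None
--     layouts = sorted(list(layout_set))
--
--     # 针对类名寻找最匹配的
--     target = class_name.lower().replace("activity", "").replace("fragment", "")
--     for l in layouts:
--         if target in l and (l.startswith("activity_") or l.startswith("fragment_")):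
--             return l
--
--     # 通用优先
--     for l in layouts:
--         if l.startswith("activity_"): return l
--     for l in layouts:
--         if l.startswith("fragment_"): return l
--
--     return layouts[0]
-- ===== SOURCE B (Python) =====
-- def _pick_primary_layout(class_name, layout_set):
--     if not layout_set:
--         return None
--     target = class_name.lower().replace("activity", "").replace("fragment", "")
--
--     def tier(l):
--         if (l.startswith("activity_") or l.startswith("fragment_")) and target in l:
--             return 0
--         if l.startswith("activity_"):
--             return 1
--         if l.startswith("fragment_"):
--             return 2
--         return 3
--
--     return min(layout_set, key=lambda l: (tier(l), l))
-- ===== Notes on version B (the rewrite author's own statement) =====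
-- stated objective: simpler
-- what changed: Replaces the sort plus four sequential scans by ranking every layout once with a priority tier and taking a single min over (tier, name), tie-broken lexicographically.
import Mathlib
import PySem

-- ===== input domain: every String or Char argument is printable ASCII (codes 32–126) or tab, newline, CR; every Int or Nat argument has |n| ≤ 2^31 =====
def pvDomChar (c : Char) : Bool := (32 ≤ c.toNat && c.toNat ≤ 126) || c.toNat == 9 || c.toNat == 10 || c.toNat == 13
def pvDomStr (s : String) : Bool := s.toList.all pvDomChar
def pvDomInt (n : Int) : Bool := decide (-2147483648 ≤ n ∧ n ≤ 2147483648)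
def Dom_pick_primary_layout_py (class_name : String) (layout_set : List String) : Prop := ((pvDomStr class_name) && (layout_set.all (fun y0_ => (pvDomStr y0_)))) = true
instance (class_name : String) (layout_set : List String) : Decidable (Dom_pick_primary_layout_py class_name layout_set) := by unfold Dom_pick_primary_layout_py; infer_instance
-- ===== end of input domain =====

-- B replaces A's sort + four sequential scans by a single min over the key (priority tier, name); same return value, different decomposition.

-- ===== PORT A =====
def pick_primary_layout_py (class_name : String) (layout_set : List String) : Option String :=
  if layout_set = [] then none
  else
    let layouts := PySem.List.sorted layout_set (fun l => l)
    let target := PySem.Str.replace (PySem.Str.replace (PySem.Str.lower class_name) "activity" "") "fragment" ""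
    match layouts.find? (fun l => PySem.Str.isIn target l && (PySem.Str.startswith l "activity_" || PySem.Str.startswith l "fragment_")) with
    | some l => some l
    | none =>
    match layouts.find? (fun l => PySem.Str.startswith l "activity_") with
    | some l => some l
    | none =>
    match layouts.find? (fun l => PySem.Str.startswith l "fragment_") with
    | some l => some l
    | none => PySem.List.pyGet? layouts 0

-- ===== PORT B =====
def pvTarget (class_name : String) : String :=
  PySem.Str.replace (PySem.Str.replace (PySem.Str.lower class_name) "activity" "") "fragment" ""

def pvTier (target l : String) : Nat :=
  if (PySem.Str.startswith l "activity_" || PySem.Str.startswith l "fragment_") && PySem.Str.isIn target l then 0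
  else if PySem.Str.startswith l "activity_" then 1
  else if PySem.Str.startswith l "fragment_" then 2
  else 3

def pick_primary_layout_py_alt (class_name : String) (layout_set : List String) : Option String :=
  if layout_set = [] then none
  else PySem.List.min2? layout_set (fun l => pvTier (pvTarget class_name) l) (fun l => l)

-- ===== PRECONDITION & SPEC =====
def Spec_pick_primary_layout_py (class_name : String) (layout_set : List String) (out : Option String) : Prop := out = pick_primary_layout_py_alt class_name layout_set
instance (class_name : String) (layout_set : List String) (out : Option String) : Decidable (Spec_pick_primary_layout_py class_name layout_set out) := by unfold Spec_pick_primary_layout_py; infer_instance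

-- ===== CLAIM (what is proved, stated in full; the proofs are below) =====
def Claim_equal_pick_primary_layout_py : Prop := ∀ (class_name : String) (layout_set : List String), Dom_pick_primary_layout_py class_name layout_set → Spec_pick_primary_layout_py class_name layout_set (pick_primary_layout_py class_name layout_set)

-- ===== LEMMAS AND PROOFS =====

-- "(tier, name) lexicographically at most": the order both programs minimise over.
def pvLe (t : String → Nat) (a b : String) : Prop := t a < t b ∨ (t a = t b ∧ a ≤ b)

theorem pvLe_refl (t : String → Nat) (a : String) : pvLe t a a := Or.inr ⟨rfl, le_refl a⟩

theorem pvLe_trans (t : String → Nat) {a b c : String} (h1 : pvLe t a b) (h2 : pvLe t b c) : pvLe t a c := by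
  rcases h1 with h1 | ⟨h1, h1'⟩ <;> rcases h2 with h2 | ⟨h2, h2'⟩
  · exact Or.inl (h1.trans h2)
  · exact Or.inl (h2 ▸ h1)
  · exact Or.inl (h1 ▸ h2)
  · exact Or.inr ⟨h1.trans h2, h1'.trans h2'⟩

theorem pvLe_antisymm (t : String → Nat) {a b : String} (h1 : pvLe t a b) (h2 : pvLe t b a) : a = b := by
  rcases h1 with h1 | ⟨h1, h1'⟩ <;> rcases h2 with h2 | ⟨h2, h2'⟩ <;> first
    | omega
    | exact le_antisymm h1' h2'

-- tier characterisations
theorem pvTier_zero (τ l : String) :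
    pvTier τ l = 0 ↔ (PySem.Str.isIn τ l && (PySem.Str.startswith l "activity_" || PySem.Str.startswith l "fragment_")) = true := by
  unfold pvTier
  cases h1 : PySem.Str.startswith l "activity_" <;> cases h2 : PySem.Str.startswith l "fragment_" <;>
    cases h3 : PySem.Str.isIn τ l <;> simp

theorem pvTier_one (τ l : String) :
    pvTier τ l = 1 ↔ ((PySem.Str.isIn τ l && (PySem.Str.startswith l "activity_" || PySem.Str.startswith l "fragment_")) = false ∧ PySem.Str.startswith l "activity_" = true) := by
  unfold pvTier
  cases h1 : PySem.Str.startswith l "activity_" <;> cases h2 : PySem.Str.startswith l "fragment_" <;>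
    cases h3 : PySem.Str.isIn τ l <;> simp

theorem pvTier_two (τ l : String) :
    pvTier τ l = 2 ↔ ((PySem.Str.isIn τ l && (PySem.Str.startswith l "activity_" || PySem.Str.startswith l "fragment_")) = false ∧ PySem.Str.startswith l "activity_" = false ∧ PySem.Str.startswith l "fragment_" = true) := by
  unfold pvTier
  cases h1 : PySem.Str.startswith l "activity_" <;> cases h2 : PySem.Str.startswith l "fragment_" <;>
    cases h3 : PySem.Str.isIn τ l <;> simp

theorem pvTier_three (τ l : String) :
    pvTier τ l = 3 ↔ (PySem.Str.startswith l "activity_" = false ∧ PySem.Str.startswith l "fragment_" = false) := by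
  unfold pvTier
  cases h1 : PySem.Str.startswith l "activity_" <;> cases h2 : PySem.Str.startswith l "fragment_" <;>
    cases h3 : PySem.Str.isIn τ l <;> simp

theorem pvTier_le_three (τ l : String) : pvTier τ l ≤ 3 := by
  unfold pvTier; split_ifs <;> omega

-- min2?'s fold keeps a running lexicographic minimum
theorem pvFold_min (t : String → Nat) (xs : List String) (m : String) :
    ∃ r, List.foldl
      (fun acc x =>
        match acc with
        | none => some x
        | some m =>
          if (decide (t x < t m) || !decide (t m < t x) && decide (x < m)) = true then some x else some m)
      (some m) xs = some r ∧ (r = m ∨ r ∈ xs) ∧ pvLe t r m ∧ ∀ y ∈ xs, pvLe t r y := by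
  induction xs generalizing m with
  | nil => exact ⟨m, rfl, Or.inl rfl, pvLe_refl t m, by simp⟩
  | cons x rest ih =>
    simp only [List.foldl_cons]
    by_cases hc : (decide (t x < t m) || !decide (t m < t x) && decide (x < m)) = true
    · rw [if_pos hc]
      have hxm : pvLe t x m := by
        simp only [Bool.or_eq_true, Bool.and_eq_true, Bool.not_eq_true', decide_eq_true_eq,
          decide_eq_false_iff_not] at hc
        rcases hc with h' | ⟨h1, h2⟩
        · exact Or.inl h'
        · by_cases h3 : t x < t m
          · exact Or.inl h3
          · exact Or.inr ⟨by omega, le_of_lt h2⟩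
      obtain ⟨r, hr, hmem, hle, hall⟩ := ih x
      refine ⟨r, hr, ?_, pvLe_trans t hle hxm, ?_⟩
      · rcases hmem with h | h
        · exact Or.inr (h ▸ List.mem_cons_self)
        · exact Or.inr (List.mem_cons_of_mem _ h)
      · intro y hy
        rcases List.mem_cons.mp hy with h | h
        · exact h ▸ hle
        · exact hall y h
    · rw [if_neg hc]
      have hmx : pvLe t m x := by
        simp only [Bool.not_eq_true, Bool.or_eq_false_iff, Bool.and_eq_false_iff,
          Bool.not_eq_false', decide_eq_true_eq, decide_eq_false_iff_not] at hc
        obtain ⟨h1, h2⟩ := hc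
        by_cases h3 : t m < t x
        · exact Or.inl h3
        · rcases h2 with h2 | h2
          · exact absurd h2 h3
          · exact Or.inr ⟨by omega, not_lt.mp h2⟩
      obtain ⟨r, hr, hmem, hle, hall⟩ := ih m
      refine ⟨r, hr, ?_, hle, ?_⟩
      · rcases hmem with h | h
        · exact Or.inl h
        · exact Or.inr (List.mem_cons_of_mem _ h)
      · intro y hy
        rcases List.mem_cons.mp hy with h | h
        · exact h ▸ pvLe_trans t hle hmx
        · exact hall y h

theorem pvMin2_spec (t : String → Nat) (xs : List String) (h : xs ≠ []) :
    ∃ m, PySem.List.min2? xs t (fun l => l) = some m ∧ m ∈ xs ∧ ∀ y ∈ xs, pvLe t m y := by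
  have hrw : PySem.List.min2? xs t (fun l => l) =
      List.foldl
        (fun acc x =>
          match acc with
          | none => some x
          | some m =>
            if (decide (t x < t m) || !decide (t m < t x) && decide (x < m)) = true then some x else some m)
        none xs := by
    unfold PySem.List.min2?
    congr 1
    funext acc x
    cases acc <;> rfl
  match xs, h with
  | x :: rest, _ =>
    rw [hrw]
    simp only [List.foldl_cons]
    obtain ⟨r, hr, hmem, hle, hall⟩ := pvFold_min t rest x
    refine ⟨r, ?_, ?_, ?_⟩
    · exact hr
    · rcases hmem with h | h
      · exact h ▸ List.mem_cons_self
      · exact List.mem_cons_of_mem _ h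
    · intro y hy
      rcases List.mem_cons.mp hy with h | h
      · exact h ▸ hle
      · exact hall y h

-- first match of p in a ≤-sorted list, where p characterises tier k and no smaller tier occurs
theorem pvFind_first {p : String → Bool} {layouts : List String} {m : String}
    (hpair : layouts.Pairwise (fun a b => a ≤ b))
    (hfind : layouts.find? p = some m) :
    ∀ y ∈ layouts, p y = true → m ≤ y := by
  obtain ⟨hpm, as, bs, heq, hpre⟩ := List.find?_eq_some_iff_append.mp hfind
  subst heq
  intro y hy hpy
  rcases List.mem_append.mp hy with h | h
  · exact absurd hpy (by simpa using hpre y h)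
  · rcases List.mem_cons.mp h with h | h
    · exact h ▸ le_refl y
    · have := (List.pairwise_append.mp hpair).2.1
      exact (List.pairwise_cons.mp this).1 y h

-- A's chain of scans returns the lexicographic (tier, name) minimum
theorem pvA_min (class_name : String) (layout_set : List String) (h : layout_set ≠ []) :
    ∃ m, pick_primary_layout_py class_name layout_set = some m ∧ m ∈ layout_set ∧
      ∀ y ∈ layout_set, pvLe (pvTier (pvTarget class_name)) m y := by
  unfold pick_primary_layout_py
  simp only [if_neg h]
  rw [show PySem.Str.replace (PySem.Str.replace (PySem.Str.lower class_name) "activity" "") "fragment" "" = pvTarget class_name from rfl]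
  set τ := pvTarget class_name with hτdef
  set t := pvTier τ with htdef
  set layouts := PySem.List.sorted layout_set (fun l => l) with hldef
  have hpair : layouts.Pairwise (fun a b => a ≤ b) := PySem.List.sorted_pairwise layout_set (fun l => l)
  have hmem : ∀ x, x ∈ layouts ↔ x ∈ layout_set := fun x => PySem.List.mem_sorted layout_set (fun l => l) false x
  have hle3 : ∀ y, t y ≤ 3 := fun y => pvTier_le_three τ y
  cases hf0 : layouts.find? (fun l => PySem.Str.isIn τ l && (PySem.Str.startswith l "activity_" || PySem.Str.startswith l "fragment_")) with
  | some m =>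
    have hm : m ∈ layouts := List.mem_of_find?_eq_some hf0
    have hpm := List.find?_some hf0
    have htm : t m = 0 := (pvTier_zero τ m).mpr hpm
    refine ⟨m, rfl, (hmem m).mp hm, fun y hy => ?_⟩
    by_cases h0 : t y = 0
    · have hpy := (pvTier_zero τ y).mp h0
      exact Or.inr ⟨by omega, pvFind_first hpair hf0 y ((hmem y).mpr hy) hpy⟩
    · exact Or.inl (by omega)
  | none =>
    have hno0 : ∀ y ∈ layouts, t y ≠ 0 := by
      intro y hy h0
      exact (List.find?_eq_none.mp hf0 y hy) ((pvTier_zero τ y).mp h0)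
    cases hf1 : layouts.find? (fun l => PySem.Str.startswith l "activity_") with
    | some m =>
      have hm : m ∈ layouts := List.mem_of_find?_eq_some hf1
      have hpm := List.find?_some hf1
      have hp0m : (PySem.Str.isIn τ m && (PySem.Str.startswith m "activity_" || PySem.Str.startswith m "fragment_")) = false := by
        have := List.find?_eq_none.mp hf0 m hm
        simpa using this
      have htm : t m = 1 := (pvTier_one τ m).mpr ⟨hp0m, hpm⟩
      refine ⟨m, rfl, (hmem m).mp hm, fun y hy => ?_⟩
      have hy' := (hmem y).mpr hy
      by_cases h1 : t y = 1
      · have hpy := ((pvTier_one τ y).mp h1).2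
        exact Or.inr ⟨by omega, pvFind_first hpair hf1 y hy' hpy⟩
      · exact Or.inl (by have := hno0 y hy'; have := hle3 y; omega)
    | none =>
      have hno1 : ∀ y ∈ layouts, t y ≠ 1 := by
        intro y hy h1
        exact (List.find?_eq_none.mp hf1 y hy) ((pvTier_one τ y).mp h1).2
      cases hf2 : layouts.find? (fun l => PySem.Str.startswith l "fragment_") with
      | some m =>
        have hm : m ∈ layouts := List.mem_of_find?_eq_some hf2
        have hpm := List.find?_some hf2
        have hp0m : (PySem.Str.isIn τ m && (PySem.Str.startswith m "activity_" || PySem.Str.startswith m "fragment_")) = false := by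
          have := List.find?_eq_none.mp hf0 m hm
          simpa using this
        have hp1m : PySem.Str.startswith m "activity_" = false := by
          have := List.find?_eq_none.mp hf1 m hm
          simpa using this
        have htm : t m = 2 := (pvTier_two τ m).mpr ⟨hp0m, hp1m, hpm⟩
        refine ⟨m, rfl, (hmem m).mp hm, fun y hy => ?_⟩
        have hy' := (hmem y).mpr hy
        by_cases h2 : t y = 2
        · have hpy := ((pvTier_two τ y).mp h2).2.2
          exact Or.inr ⟨by omega, pvFind_first hpair hf2 y hy' hpy⟩
        · exact Or.inl (by have := hno0 y hy'; have := hno1 y hy'; have := hle3 y; omega)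
      | none =>
        have hno2 : ∀ y ∈ layouts, t y = 3 := by
          intro y hy
          have h1 := List.find?_eq_none.mp hf1 y hy
          have h2 := List.find?_eq_none.mp hf2 y hy
          exact (pvTier_three τ y).mpr ⟨by simpa using h1, by simpa using h2⟩
        have hne : layouts ≠ [] := by
          intro hnil
          exact h ((PySem.List.sorted_eq_nil_iff layout_set (fun l => l) false).mp hnil)
        match hl2 : layouts, hne with
        | hd :: tl, _ =>
          refine ⟨hd, by simp [PySem.List.pyGet?, PySem.List.pyIdx?], (hmem hd).mp List.mem_cons_self, fun y hy => ?_⟩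
          have hy' := (hmem y).mpr hy
          refine Or.inr ⟨by rw [hno2 hd List.mem_cons_self, hno2 y hy'], ?_⟩
          rcases List.mem_cons.mp hy' with hh | hh
          · exact hh ▸ le_refl y
          · exact (List.pairwise_cons.mp hpair).1 y hh

-- ===== VERDICT (by name: the statement is the Claim_ definition above) =====
theorem pick_primary_layout_py_spec : Claim_equal_pick_primary_layout_py := by
  intro class_name layout_set _
  unfold Spec_pick_primary_layout_py
  by_cases h : layout_set = []
  · subst h; rfl
  · obtain ⟨a, ha, hamem, hale⟩ := pvA_min class_name layout_set h
    obtain ⟨b, hb, hbmem, hble⟩ := pvMin2_spec (pvTier (pvTarget class_name)) layout_set h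
    have hab : a = b := pvLe_antisymm _ (hale b hbmem) (hble a hamem)
    rw [ha]
    unfold pick_primary_layout_py_alt
    rw [if_neg h, hb, hab]
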